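-- pv_equiv track=rewrite | github.com/bloodyteeths/proofkit | middleware/current_user.py | _should_skip_auth
-- ===== SOURCE A (Python) =====
-- def _should_skip_auth(path: str) -> bool:
--     """
--     Check if authentication should be skipped for this path.
--
--     Args:
--         path: Request path
--
--     Returns:
--         True if authentication should be skipped
--     """
--     skip_paths = {
--         "/health",
--         "/favicon.ico",
--         "/robots.txt",
--         "/sitemap.xml",
--         "/api/signup",
--         "/api/magic/consume",
--         "/auth/login",
--         "/auth/verify",
--         "/static",
--         "/docs",
--         "/redoc",
--         "/openapi.json"
--     }
--
--     # Check for exact matches or path prefixes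
--     return any(
--         path == skip_path or path.startswith(skip_path + "/")
--         for skip_path in skip_paths
--     )
-- ===== SOURCE B (Python) =====
-- _SKIP_PATHS = frozenset((
--     "/api/magic/consume", "/api/signup", "/auth/login", "/auth/verify",
--     "/docs", "/favicon.ico", "/health", "/openapi.json",
--     "/redoc", "/robots.txt", "/sitemap.xml", "/static",
-- ))
--
--
-- def _should_skip_auth(path: str) -> bool:
--     # Walk the path's own segment boundaries instead of scanning the pattern set:
--     # the path is skipped iff it, or one of its '/'-boundary prefixes, is in the set.
--     if path in _SKIP_PATHS:
--         return True
--     for i, ch in enumerate(path):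
--         if ch == '/' and path[:i] in _SKIP_PATHS:
--             return True
--     return False
-- ===== Notes on version B (the rewrite author's own statement) =====
-- stated objective: alternative
-- what changed: A scans the fixed skip-path set and tests exact equality or a slash-extended startswith for each pattern; B inverts the traversal: it walks the incoming path's own slash-boundary prefixes (the full path plus the prefix before each slash position) and returns True on the first one found in the frozenset.
import Mathlib
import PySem

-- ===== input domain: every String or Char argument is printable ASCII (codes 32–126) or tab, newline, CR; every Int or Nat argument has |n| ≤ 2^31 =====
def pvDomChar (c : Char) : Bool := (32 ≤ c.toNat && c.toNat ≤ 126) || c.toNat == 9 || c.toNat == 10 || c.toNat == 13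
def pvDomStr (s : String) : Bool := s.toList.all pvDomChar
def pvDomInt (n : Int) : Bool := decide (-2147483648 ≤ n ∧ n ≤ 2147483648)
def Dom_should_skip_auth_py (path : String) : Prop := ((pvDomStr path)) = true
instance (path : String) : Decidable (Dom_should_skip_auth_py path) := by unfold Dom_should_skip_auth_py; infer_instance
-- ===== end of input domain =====

-- B replaces A's scan over the pattern set (startswith per pattern) by a single walk over the
-- path's own slash-boundary prefixes with set-membership lookups; objective: alternative decomposition.

-- ===== PORT A =====
-- the skip_paths set literal of A (iteration order of a set does not affect `any`)
def pvSkipPaths : List String :=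
  ["/health", "/favicon.ico", "/robots.txt", "/sitemap.xml", "/api/signup",
   "/api/magic/consume", "/auth/login", "/auth/verify", "/static", "/docs",
   "/redoc", "/openapi.json"]

def should_skip_auth_py (path : String) : Bool :=
  pvSkipPaths.any (fun sp =>
    path.toList == sp.toList || PySem.Chars.startswith path.toList (sp.toList ++ ['/']))

-- ===== PORT B =====
-- B's _SKIP_PATHS frozenset (distinct elements; used only for membership tests)
def pvSkipSet : List (List Char) :=
  ["/api/magic/consume".toList, "/api/signup".toList, "/auth/login".toList,
   "/auth/verify".toList, "/docs".toList, "/favicon.ico".toList,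
   "/health".toList, "/openapi.json".toList, "/redoc".toList,
   "/robots.txt".toList, "/sitemap.xml".toList, "/static".toList]

def should_skip_auth_py_alt (path : String) : Bool :=
  let cs := path.toList
  if pvSkipSet.contains cs then true
  else
    (PySem.List.enumerate cs).any (fun ic =>
      ic.2 == '/' && pvSkipSet.contains (PySem.List.slice cs none (some ic.1)))

-- ===== PRECONDITION & SPEC =====
def Spec_should_skip_auth_py (path : String) (out : Bool) : Prop := out = should_skip_auth_py_alt path
instance (path : String) (out : Bool) : Decidable (Spec_should_skip_auth_py path out) := by unfold Spec_should_skip_auth_py; infer_instance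

-- ===== CLAIM (what is proved, stated in full; the proofs are below) =====
def Claim_equal_should_skip_auth_py : Prop := ∀ (path : String), Dom_should_skip_auth_py path → Spec_should_skip_auth_py path (should_skip_auth_py path)

-- ===== LEMMAS AND PROOFS =====

-- the two literal pattern collections hold the same strings
theorem mem_pvSkipSet_iff (q : List Char) :
    q ∈ pvSkipSet ↔ ∃ sp ∈ pvSkipPaths, q = sp.toList := by
  simp [pvSkipSet, pvSkipPaths]
  tauto

theorem mem_enumerate_iff {α : Type} (xs : List α) (s : Int) (p : Int × α) :
    p ∈ PySem.List.enumerate xs s ↔ ∃ k : Nat, ∃ h : k < xs.length, p = (s + k, xs[k]) := by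
  induction xs generalizing s with
  | nil => simp [PySem.List.enumerate_nil]
  | cons x xs ih =>
    rw [PySem.List.enumerate_cons]
    constructor
    · intro hp
      rcases List.mem_cons.mp hp with h | h
      · exact ⟨0, by simp, by simpa using h⟩
      · rcases (ih (s + 1)).mp h with ⟨k, hk, hpk⟩
        exact ⟨k + 1, by simpa using hk, by simpa [add_comm, add_left_comm] using hpk⟩
    · rintro ⟨k, hk, rfl⟩
      cases k with
      | zero => simp
      | succ k =>
        refine List.mem_cons_of_mem _ ((ih (s + 1)).mpr ⟨k, by simpa using hk, ?_⟩)
        simp [add_comm, add_left_comm]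

-- A true ⇔ some pattern matches exactly or as a slash-boundary prefix
theorem portA_iff (path : String) :
    should_skip_auth_py path = true ↔
      ∃ sp ∈ pvSkipPaths, path.toList = sp.toList ∨ (sp.toList ++ ['/']) <+: path.toList := by
  simp [should_skip_auth_py, PySem.Chars.startswith, List.isPrefixOf_iff_prefix]

-- B true ⇔ the path itself or one of its slash-boundary proper prefixes is in the set
theorem portB_iff (path : String) :
    should_skip_auth_py_alt path = true ↔
      path.toList ∈ pvSkipSet ∨
        ∃ k : Nat, ∃ h : k < path.toList.length,
          path.toList[k] = '/' ∧ path.toList.take k ∈ pvSkipSet := by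
  unfold should_skip_auth_py_alt
  by_cases hmem : pvSkipSet.contains path.toList
  · simp [List.contains_iff_mem.mp hmem]
  · simp only [hmem, if_neg, Bool.false_eq_true, not_false_iff, List.any_eq_true]
    rw [List.contains_iff_mem] at hmem
    simp only [hmem, false_or]
    constructor
    · rintro ⟨ic, hic, hcond⟩
      rcases (mem_enumerate_iff _ _ _).mp hic with ⟨k, hk, rfl⟩
      simp only [Bool.and_eq_true, beq_iff_eq, List.contains_iff_mem] at hcond
      refine ⟨k, hk, hcond.1, ?_⟩
      have hsl : PySem.List.slice path.toList none (some ((0 : Int) + k)) = path.toList.take k := by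
        rw [PySem.List.slice_to path.toList (b := (0 : Int) + k) (by omega)]
        simp
      rw [hsl] at hcond
      exact hcond.2
    · rintro ⟨k, hk, hch, htake⟩
      refine ⟨((0 : Int) + k, path.toList[k]), (mem_enumerate_iff _ _ _).mpr ⟨k, hk, rfl⟩, ?_⟩
      simp only [Bool.and_eq_true, beq_iff_eq, List.contains_iff_mem]
      refine ⟨hch, ?_⟩
      rw [PySem.List.slice_to path.toList (b := (0 : Int) + k) (by omega)]
      simpa using htake

theorem main_iff (path : String) :
    should_skip_auth_py path = should_skip_auth_py_alt path := by
  rw [Bool.eq_iff_iff, portA_iff, portB_iff]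
  constructor
  · rintro ⟨sp, hsp, heq | hpre⟩
    · exact Or.inl (heq ▸ (mem_pvSkipSet_iff _).mpr ⟨sp, hsp, rfl⟩)
    · right
      have hlen : sp.toList.length + 1 ≤ path.toList.length := by
        simpa using hpre.length_le
      have hn : sp.toList.length < path.toList.length := by omega
      have hcat : sp.toList ++ ['/'] =
          path.toList.take sp.toList.length ++ [path.toList[sp.toList.length]] :=
        calc sp.toList ++ ['/']
            = path.toList.take (sp.toList.length + 1) := by
              simpa using List.prefix_iff_eq_take.mp hpre
          _ = path.toList.take sp.toList.length ++ [path.toList[sp.toList.length]] := by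
              rw [← List.take_concat_get (l := path.toList) hn, List.concat_eq_append]
      obtain ⟨h1, h2⟩ := List.append_inj hcat (by rw [List.length_take]; omega)
      refine ⟨sp.toList.length, hn, by simpa using h2.symm, ?_⟩
      exact (mem_pvSkipSet_iff _).mpr ⟨sp, hsp, h1.symm⟩
  · rintro (hmem | ⟨k, hk, hch, htake⟩)
    · rcases (mem_pvSkipSet_iff _).mp hmem with ⟨sp, hsp, hq⟩
      exact ⟨sp, hsp, Or.inl hq⟩
    · rcases (mem_pvSkipSet_iff _).mp htake with ⟨sp, hsp, hq⟩
      refine ⟨sp, hsp, Or.inr ?_⟩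
      have : sp.toList ++ ['/'] = path.toList.take (k + 1) := by
        rw [← List.take_concat_get (l := path.toList) (i := k) hk, List.concat_eq_append,
          ← hq, hch]
      rw [this]
      exact List.take_prefix _ _

-- ===== VERDICT (by name: the statement is the Claim_ definition above) =====
theorem should_skip_auth_py_spec : Claim_equal_should_skip_auth_py := by
  intro path _
  unfold Spec_should_skip_auth_py
  exact main_iff path
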